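-- pv_equiv track=rewrite | github.com/justinmyersdata/ProjectEuler | 28_Project_Euler.py | get_spiral
-- ===== SOURCE A (Python) =====
-- def is_square(x):
--     squares = [i*i for i in range(1,1002)]
--     if x in squares:
--         return True
--     return False
--
-- def get_spiral(x):
--     spiral = []
--     small_list = []
--     for num in range(1,x+1):
--         small_list.append(num)
--         if num % 2 == 1 and is_square(num):
--             spiral.append(small_list)
--             small_list = []
--         elif num == x:
--             spiral.append(small_list)
--     return(spiral)
-- ===== SOURCE B (Python) =====
-- def get_spiral(x):
--     # Precompute the odd-square split boundaries A's bounded is_square can see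
--     # (same bounded range, so the same cap), then emit whole ranges between
--     # consecutive boundaries in one pass.
--     boundaries = [i * i for i in range(1, 1002) if i % 2 == 1]
--     spiral = []
--     start = 1
--     for b in boundaries:
--         if b > x:
--             break
--         spiral.append(list(range(start, b + 1)))
--         start = b + 1
--     if start <= x:
--         spiral.append(list(range(start, x + 1)))
--     return spiral
-- ===== Notes on version B (the rewrite author's own statement) =====
-- stated objective: faster
-- what changed: B precomputes the list of odd-square split boundaries once (from the same bounded range A's is_square scans) and emits whole ranges between consecutive boundaries in one pass, instead of accumulating number-by-number while rebuilding and scanning a squares list for every number.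
import Mathlib
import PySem

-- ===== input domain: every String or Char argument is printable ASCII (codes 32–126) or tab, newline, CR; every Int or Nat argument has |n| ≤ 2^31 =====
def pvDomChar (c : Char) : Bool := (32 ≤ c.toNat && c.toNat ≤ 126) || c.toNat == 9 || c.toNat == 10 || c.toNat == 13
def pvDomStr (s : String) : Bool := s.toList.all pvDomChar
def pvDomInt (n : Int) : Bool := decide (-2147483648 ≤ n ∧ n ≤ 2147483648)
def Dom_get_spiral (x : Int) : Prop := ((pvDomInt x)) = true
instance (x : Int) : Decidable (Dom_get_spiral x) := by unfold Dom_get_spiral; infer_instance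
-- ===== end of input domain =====

-- B precomputes the odd-square split boundaries once (same bounded range as A's is_square)
-- and emits whole ranges between consecutive boundaries in one pass, instead of A's
-- number-by-number accumulation that rebuilds and scans a squares list for every number.

-- ===== PORT A =====
def is_square (x : Int) : Bool :=
  let squares := (PySem.List.pyRange 1 1002 1).map (fun i => i * i)
  if squares.contains x then true else false

def get_spiral (x : Int) : List (List Int) :=
  ((PySem.List.pyRange 1 (x + 1) 1).foldl
    (fun (st : List (List Int) × List Int) num =>
      let small := st.2 ++ [num]
      if PySem.Int.mod num 2 == 1 && is_square num then (st.1 ++ [small], [])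
      else if num == x then (st.1 ++ [small], small)
      else (st.1, small))
    ([], [])).1

-- ===== PORT B =====
-- 'for b in boundaries: if b > x: break; …' as structural recursion returning
-- (groups emitted, final start).
def bLoop (x : Int) : List Int → Int → List (List Int) × Int
  | [], start => ([], start)
  | b :: bs, start =>
    if x < b then ([], start)
    else
      let r := bLoop x bs (b + 1)
      (PySem.List.pyRange start (b + 1) 1 :: r.1, r.2)

def get_spiral_alt (x : Int) : List (List Int) :=
  let boundaries := ((PySem.List.pyRange 1 1002 1).filter
      (fun i => PySem.Int.mod i 2 == 1)).map (fun i => i * i)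
  let r := bLoop x boundaries 1
  if r.2 ≤ x then r.1 ++ [PySem.List.pyRange r.2 (x + 1) 1] else r.1

-- ===== PRECONDITION & SPEC =====
def Spec_get_spiral (x : Int) (out : List (List Int)) : Prop := out = get_spiral_alt x
instance (x : Int) (out : List (List Int)) : Decidable (Spec_get_spiral x out) := by unfold Spec_get_spiral; infer_instance

-- ===== CLAIM (what is proved, stated in full; the proofs are below) =====
def Claim_equal_get_spiral : Prop := ∀ (x : Int), Dom_get_spiral x → Spec_get_spiral x (get_spiral x)

-- ===== LEMMAS AND PROOFS =====

-- the boundary list B precomputes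
def pvBnds : List Int :=
  ((PySem.List.pyRange 1 1002 1).filter (fun i => PySem.Int.mod i 2 == 1)).map (fun i => i * i)

-- A's loop body without the 'elif num == x' branch (that branch can only fire at the last element)
def pvStep (st : List (List Int) × List Int) (num : Int) : List (List Int) × List Int :=
  let small := st.2 ++ [num]
  if PySem.Int.mod num 2 == 1 && is_square num then (st.1 ++ [small], []) else (st.1, small)

def pvFA (n : Int) : List (List Int) × List Int :=
  (PySem.List.pyRange 1 (n + 1) 1).foldl pvStep ([], [])

theorem pvMod2 (n : Int) : ((PySem.Int.mod n 2 == 1) = true) ↔ Odd n := by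
  rw [PySem.Int.mod_eq_emod_of_pos (a := n) (by norm_num)]
  simp [Int.odd_iff]

theorem is_square_iff (x : Int) :
    is_square x = true ↔ ∃ i, (1 ≤ i ∧ i < 1002) ∧ i * i = x := by
  unfold is_square
  simp only []
  split
  · rename_i h
    simp only [List.contains_eq_mem, List.mem_map, PySem.List.mem_pyRange_one,
      decide_eq_true_eq] at h
    simpa using h
  · rename_i h
    simp only [List.contains_eq_mem, List.mem_map, PySem.List.mem_pyRange_one,
      decide_eq_true_eq] at h
    simp only [Bool.false_eq_true, false_iff]
    intro ⟨i, ⟨h1, h2⟩, he⟩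
    exact h ⟨i, ⟨h1, h2⟩, he⟩

theorem pvBnds_pos : ∀ b ∈ pvBnds, 1 ≤ b := by
  intro b hb
  simp only [pvBnds, List.mem_map, List.mem_filter, PySem.List.mem_pyRange_one] at hb
  obtain ⟨i, ⟨⟨h1, _⟩, _⟩, rfl⟩ := hb
  nlinarith

theorem pvBnds_sorted : pvBnds.Pairwise (· < ·) := by
  unfold pvBnds
  rw [List.pairwise_map]
  have h := (PySem.List.pairwise_lt_pyRange_one (a := 1) (b := 1002)).filter
      (fun i => PySem.Int.mod i 2 == 1)
  refine h.imp_of_mem ?_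
  intro a b ha hb hlt
  have ha1 : 1 ≤ a := by
    have := (List.mem_filter.mp ha).1
    exact (PySem.List.mem_pyRange_one.mp this).1
  nlinarith

theorem mem_pvBnds (n : Int) :
    n ∈ pvBnds ↔ (PySem.Int.mod n 2 == 1 && is_square n) = true := by
  rw [Bool.and_eq_true, is_square_iff]
  simp only [pvBnds, List.mem_map, List.mem_filter, PySem.List.mem_pyRange_one]
  constructor
  · rintro ⟨i, ⟨⟨h1, h2⟩, hodd⟩, rfl⟩
    have hoi : Odd i := (pvMod2 i).mp hodd
    exact ⟨(pvMod2 _).mpr (Int.odd_mul.mpr ⟨hoi, hoi⟩), i, ⟨h1, h2⟩, rfl⟩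
  · rintro ⟨hodd, i, ⟨h1, h2⟩, rfl⟩
    have hoi : Odd i := (Int.odd_mul.mp ((pvMod2 _).mp hodd)).1
    exact ⟨i, ⟨⟨h1, h2⟩, (pvMod2 i).mpr hoi⟩, rfl⟩

theorem bLoop_stop (x : Int) (bs : List Int) (start : Int) (h : ∀ b ∈ bs, x < b) :
    bLoop x bs start = ([], start) := by
  cases bs with
  | nil => rfl
  | cons b bs => simp [bLoop, h b (by simp)]

theorem bLoop_snd_le (x : Int) (bs : List Int) (start : Int) (h : start ≤ x + 1) :
    (bLoop x bs start).2 ≤ x + 1 := by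
  induction bs generalizing start with
  | nil => simpa [bLoop]
  | cons b bs ih =>
    simp only [bLoop]
    split
    · simpa
    · rename_i hb
      exact ih (b + 1) (by omega)

theorem bLoop_not_mem (n : Int) (bs : List Int) (start : Int) (h : (n + 1) ∉ bs) :
    bLoop (n + 1) bs start = bLoop n bs start := by
  induction bs generalizing start with
  | nil => rfl
  | cons b bs ih =>
    have hne : b ≠ n + 1 := fun he => h (by simp [he])
    have h' : (n + 1) ∉ bs := fun he => h (by simp [he])
    simp only [bLoop]
    by_cases hb : n < b
    · rw [if_pos (by omega), if_pos hb]
    · rw [if_neg (by omega), if_neg hb, ih (b + 1) h']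

theorem bLoop_mem (n : Int) (bs : List Int) (start : Int) (hs : bs.Pairwise (· < ·))
    (h : (n + 1) ∈ bs) :
    bLoop (n + 1) bs start =
      ((bLoop n bs start).1 ++ [PySem.List.pyRange (bLoop n bs start).2 (n + 2) 1], n + 2) := by
  induction bs generalizing start with
  | nil => simp at h
  | cons b bs ih =>
    rcases List.mem_cons.mp h with he | hm
    · -- b = n + 1
      have hb : b = n + 1 := he.symm
      subst hb
      have hrest : ∀ c ∈ bs, n + 1 < c := (List.pairwise_cons.mp hs).1
      simp only [bLoop]
      rw [if_neg (by omega), if_pos (by omega),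
        bLoop_stop (n + 1) bs (n + 1 + 1) hrest]
      simp [show n + 1 + 1 = n + 2 from by ring]
    · -- n + 1 ∈ bs, so b < n + 1
      have hbn : b < n + 1 := (List.pairwise_cons.mp hs).1 _ hm
      simp only [bLoop]
      rw [if_neg (by omega), if_neg (by omega),
        ih (b + 1) (List.pairwise_cons.mp hs).2 hm]
      simp

set_option maxRecDepth 4096 in
theorem pvInv (n : Nat) :
    pvFA (n : Int) = ((bLoop (n : Int) pvBnds 1).1,
      PySem.List.pyRange (bLoop (n : Int) pvBnds 1).2 ((n : Int) + 1) 1) := by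
  induction n with
  | zero =>
    rw [show ((0 : Nat) : Int) = 0 from rfl,
      bLoop_stop 0 pvBnds 1 (fun b hb => by have := pvBnds_pos b hb; omega)]
    simp [pvFA]
  | succ n ih =>
    have hcast : ((n + 1 : Nat) : Int) = (n : Int) + 1 := by push_cast; ring
    have hs : (bLoop (n : Int) pvBnds 1).2 ≤ (n : Int) + 1 :=
      bLoop_snd_le _ _ _ (by omega)
    rw [hcast]
    have hr : PySem.List.pyRange 1 ((n : Int) + 1 + 1) 1
        = PySem.List.pyRange 1 ((n : Int) + 1) 1 ++ [(n : Int) + 1] :=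
      PySem.List.pyRange_one_succ_right (by omega)
    unfold pvFA
    rw [hr, List.foldl_append]
    have hFA : (PySem.List.pyRange 1 ((n : Int) + 1) 1).foldl pvStep ([], []) = pvFA (n : Int) := rfl
    rw [hFA, ih]
    by_cases hB : (PySem.Int.mod ((n : Int) + 1) 2 == 1 && is_square ((n : Int) + 1)) = true
    · have hmem : ((n : Int) + 1) ∈ pvBnds := (mem_pvBnds _).mpr hB
      rw [bLoop_mem (n : Int) pvBnds 1 pvBnds_sorted hmem]
      simp only [List.foldl_cons, List.foldl_nil, pvStep, hB, if_true]
      rw [← PySem.List.pyRange_one_succ_right hs,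
        PySem.List.pyRange_one_eq_nil (a := (n : Int) + 2) (b := (n : Int) + 1 + 1) (by omega),
        show (n : Int) + 1 + 1 = (n : Int) + 2 from by ring]
    · have hmem : ((n : Int) + 1) ∉ pvBnds := fun hm => hB ((mem_pvBnds _).mp hm)
      rw [bLoop_not_mem (n : Int) pvBnds 1 hmem]
      simp only [List.foldl_cons, List.foldl_nil, pvStep, hB]
      rw [← PySem.List.pyRange_one_succ_right hs]
      simp

theorem pvGetA (x : Int) (hx : 1 ≤ x) :
    get_spiral x = (pvFA (x - 1)).1 ++ [(pvFA (x - 1)).2 ++ [x]] := by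
  unfold get_spiral
  rw [show x + 1 = x + 1 from rfl,
    PySem.List.pyRange_one_succ_right (a := 1) (b := x) hx, List.foldl_append]
  have hpre : (PySem.List.pyRange 1 x 1).foldl
      (fun (st : List (List Int) × List Int) num =>
        let small := st.2 ++ [num]
        if PySem.Int.mod num 2 == 1 && is_square num then (st.1 ++ [small], [])
        else if num == x then (st.1 ++ [small], small)
        else (st.1, small)) ([], [])
      = (PySem.List.pyRange 1 x 1).foldl pvStep ([], []) := by
    apply PySem.List.foldl_congr_mem
    intro acc num hnum
    have hlt : num < x := (PySem.List.mem_pyRange_one.mp hnum).2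
    simp only [pvStep]
    split
    · rfl
    · rw [if_neg (by simp; omega)]
  rw [hpre]
  have hFA : (PySem.List.pyRange 1 x 1).foldl pvStep ([], []) = pvFA (x - 1) := by
    unfold pvFA
    rw [show x - 1 + 1 = x from by ring]
  rw [hFA]
  simp only [List.foldl_cons, List.foldl_nil]
  split
  · rfl
  · rw [if_pos (by simp)]

theorem pvAltEq (x : Int) :
    get_spiral_alt x =
      (if (bLoop x pvBnds 1).2 ≤ x
       then (bLoop x pvBnds 1).1 ++ [PySem.List.pyRange (bLoop x pvBnds 1).2 (x + 1) 1]
       else (bLoop x pvBnds 1).1) := rfl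

-- ===== VERDICT (by name: the statement is the Claim_ definition above) =====
theorem get_spiral_spec : Claim_equal_get_spiral := by
  intro x _
  unfold Spec_get_spiral
  by_cases hx : 1 ≤ x
  · obtain ⟨n, hn⟩ : ∃ n : Nat, (n : Int) = x - 1 := ⟨(x - 1).toNat, by omega⟩
    have hinv := pvInv n
    rw [hn] at hinv
    rw [show x - 1 + 1 = x from by ring] at hinv
    have hs : (bLoop (x - 1) pvBnds 1).2 ≤ x := by
      have := bLoop_snd_le (x - 1) pvBnds 1 (by omega)
      omega
    rw [pvGetA x hx, hinv, pvAltEq]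
    by_cases hmem : x ∈ pvBnds
    · have hm' : ((x - 1) + 1) ∈ pvBnds := by rwa [show x - 1 + 1 = x from by ring]
      have hb := bLoop_mem (x - 1) pvBnds 1 pvBnds_sorted hm'
      rw [show x - 1 + 1 = x from by ring, show x - 1 + 2 = x + 1 from by ring] at hb
      rw [hb]
      simp only
      rw [if_neg (by omega), ← PySem.List.pyRange_one_succ_right hs]
    · have hm' : ((x - 1) + 1) ∉ pvBnds := by rwa [show x - 1 + 1 = x from by ring]
      have hb := bLoop_not_mem (x - 1) pvBnds 1 hm'
      rw [show x - 1 + 1 = x from by ring] at hb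
      rw [hb, if_pos hs, ← PySem.List.pyRange_one_succ_right hs]
  · have hA : get_spiral x = [] := by
      unfold get_spiral
      rw [PySem.List.pyRange_one_eq_nil (by omega)]
      rfl
    have hB : get_spiral_alt x = [] := by
      rw [pvAltEq, bLoop_stop x pvBnds 1 (fun b hb => by have := pvBnds_pos b hb; omega)]
      simp only
      rw [if_neg (by omega)]
    rw [hA, hB]
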